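-- pv_equiv track=rewrite | github.com/Johnjohnbei/vidscope | src/vidscope/adapters/config/yaml_vocabulary.py | _pack_into_budget
-- ===== SOURCE A (Python) =====
-- def _pack_into_budget(terms: list[str], max_chars: int) -> str:
--     """Assemble les termes séparés par ', ' jusqu'à ``max_chars``."""
--     parts: list[str] = []
--     total = 0
--     for term in terms:
--         needed = len(term) + (2 if parts else 0)  # ", " separator
--         if total + needed > max_chars:
--             break
--         parts.append(term)
--         total += needed
--     return ", ".join(parts)
-- ===== SOURCE B (Python) =====
-- from bisect import bisect_right
--
--
-- def _pack_into_budget(terms: list[str], max_chars: int) -> str: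
--     """Build a prefix-sum table of cumulative costs (len + separators), then
--     binary-search the cutoff with bisect_right instead of a fused break loop."""
--     costs = []
--     acc = -2  # so the first term costs exactly len(term), later ones len+2
--     for t in terms:
--         acc += len(t) + 2
--         costs.append(acc)
--     k = bisect_right(costs, max_chars)
--     return ", ".join(terms[:k])
-- ===== Notes on version B (the rewrite author's own statement) =====
-- stated objective: alternative
-- what changed: Replaced A's fused accumulate-and-break loop by a build-prefix-cost-table pass followed by a bisect_right binary search for the cutoff count, then a single slice-and-join.
import Mathlib
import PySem

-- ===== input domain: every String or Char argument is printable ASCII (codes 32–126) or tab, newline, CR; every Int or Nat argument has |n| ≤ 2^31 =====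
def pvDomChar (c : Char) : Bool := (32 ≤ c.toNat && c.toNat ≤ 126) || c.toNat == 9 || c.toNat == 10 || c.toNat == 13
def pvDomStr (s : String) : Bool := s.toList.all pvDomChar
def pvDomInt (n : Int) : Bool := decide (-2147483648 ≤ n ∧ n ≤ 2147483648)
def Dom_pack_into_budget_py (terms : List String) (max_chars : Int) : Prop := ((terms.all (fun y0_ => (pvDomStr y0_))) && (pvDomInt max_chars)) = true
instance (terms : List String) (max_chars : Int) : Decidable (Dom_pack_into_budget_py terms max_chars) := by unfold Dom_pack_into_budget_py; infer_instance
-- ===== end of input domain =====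

-- B replaces A's fused accumulate-and-break loop by a prefix-cost table plus a
-- bisect_right binary search for the cutoff (alternative decomposition, same cost).


-- ===== PORT A =====
-- the for-loop over terms, carrying (parts, total); breaking returns parts
def pvPackLoopA (max_chars : Int) : List String → List String → Int → List String
  | [], parts, _ => parts
  | t :: rest, parts, total =>
    let needed := PySem.Str.len t + (if parts ≠ [] then 2 else 0)
    if total + needed > max_chars then parts
    else pvPackLoopA max_chars rest (parts ++ [t]) (total + needed)

def pack_into_budget_py (terms : List String) (max_chars : Int) : String :=
  PySem.Str.join ", " (pvPackLoopA max_chars terms [] 0)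

-- ===== PORT B =====
-- the prefix-cost loop of Source B: acc starts at -2, acc += len(t) + 2, append
def pvCostsB : List String → Int → List Int
  | [], _ => []
  | t :: rest, acc =>
    let acc' := acc + PySem.Str.len t + 2
    acc' :: pvCostsB rest acc'

def pack_into_budget_py_alt (terms : List String) (max_chars : Int) : String :=
  let costs := pvCostsB terms (-2)
  let k := PySem.List.bisectRight costs max_chars
  PySem.Str.join ", " (PySem.List.slice terms none (some (k : Int)))

-- ===== PRECONDITION & SPEC =====
def Spec_pack_into_budget_py (terms : List String) (max_chars : Int) (out : String) : Prop := out = pack_into_budget_py_alt terms max_chars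
instance (terms : List String) (max_chars : Int) (out : String) : Decidable (Spec_pack_into_budget_py terms max_chars out) := by unfold Spec_pack_into_budget_py; infer_instance

-- ===== CLAIM (what is proved, stated in full; the proofs are below) =====
def Claim_equal_pack_into_budget_py : Prop := ∀ (terms : List String) (max_chars : Int), Dom_pack_into_budget_py terms max_chars → Spec_pack_into_budget_py terms max_chars (pack_into_budget_py terms max_chars)

-- ===== LEMMAS AND PROOFS =====

-- reference count: how many terms A's loop takes when it continues with accumulator acc
def pvCnt (max_chars : Int) : List String → Int → Nat
  | [], _ => 0
  | t :: rest, acc =>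
    if acc + PySem.Str.len t + 2 > max_chars then 0
    else pvCnt max_chars rest (acc + PySem.Str.len t + 2) + 1

theorem pvCnt_le (max_chars : Int) (terms : List String) (acc : Int) :
    pvCnt max_chars terms acc ≤ terms.length := by
  induction terms generalizing acc with
  | nil => simp [pvCnt]
  | cons t rest ih =>
    simp only [pvCnt, List.length_cons]
    split
    · omega
    · have := ih (acc + PySem.Str.len t + 2); omega

theorem pvPackLoopA_eq_take (max_chars : Int) (rest : List String) (parts : List String)
    (total : Int) (hp : parts ≠ []) :
    pvPackLoopA max_chars rest parts total = parts ++ rest.take (pvCnt max_chars rest total) := by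
  induction rest generalizing parts total with
  | nil => simp [pvPackLoopA, pvCnt]
  | cons t tl ih =>
    simp only [pvPackLoopA, pvCnt, if_pos hp]
    by_cases h : total + PySem.Str.len t + 2 > max_chars
    · rw [if_pos (by omega : total + (PySem.Str.len t + 2) > max_chars), if_pos h]
      simp
    · rw [if_neg (by omega : ¬ total + (PySem.Str.len t + 2) > max_chars), if_neg h,
        ih (parts ++ [t]) _ (by simp),
        show total + (PySem.Str.len t + 2) = total + PySem.Str.len t + 2 from by ring]
      simp [List.take_succ_cons]

theorem pvPackA_take (max_chars : Int) (terms : List String) :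
    pvPackLoopA max_chars terms [] 0 = terms.take (pvCnt max_chars terms (-2)) := by
  cases terms with
  | nil => simp [pvPackLoopA, pvCnt]
  | cons t tl =>
    simp only [pvPackLoopA, pvCnt]
    rw [if_neg (by simp : ¬ ([] : List String) ≠ [])]
    by_cases h : -2 + PySem.Str.len t + 2 > max_chars
    · rw [if_pos (by omega : (0 : Int) + (PySem.Str.len t + 0) > max_chars), if_pos h]
      simp
    · rw [if_neg (by omega : ¬ (0 : Int) + (PySem.Str.len t + 0) > max_chars), if_neg h,
        List.nil_append, pvPackLoopA_eq_take max_chars tl [t] _ (by simp),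
        show (0 : Int) + (PySem.Str.len t + 0) = -2 + PySem.Str.len t + 2 from by ring]
      simp [List.take_succ_cons]

theorem pvCostsB_length (terms : List String) (acc : Int) :
    (pvCostsB terms acc).length = terms.length := by
  induction terms generalizing acc with
  | nil => simp [pvCostsB]
  | cons t tl ih => simp [pvCostsB, ih]

theorem pvCostsB_lb (terms : List String) (acc : Int) (y : Int) (hy : y ∈ pvCostsB terms acc) :
    acc + 2 ≤ y := by
  induction terms generalizing acc with
  | nil => simp [pvCostsB] at hy
  | cons t tl ih =>
    simp only [pvCostsB, List.mem_cons] at hy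
    have hl : (0 : Int) ≤ PySem.Str.len t := by simp [PySem.Str.len_eq]
    rcases hy with h | h
    · omega
    · have := ih (acc + PySem.Str.len t + 2) h; omega

theorem pvCostsB_pairwise (terms : List String) (acc : Int) :
    (pvCostsB terms acc).Pairwise (· ≤ ·) := by
  induction terms generalizing acc with
  | nil => simp [pvCostsB]
  | cons t tl ih =>
    simp only [pvCostsB]
    refine List.Pairwise.cons (fun y hy => ?_) (ih _)
    have := pvCostsB_lb tl (acc + PySem.Str.len t + 2) y hy
    omega

theorem pvCnt_low (max_chars : Int) (terms : List String) (acc : Int) :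
    ∀ j (hj : j < (pvCostsB terms acc).length), j < pvCnt max_chars terms acc →
      (pvCostsB terms acc)[j] ≤ max_chars := by
  induction terms generalizing acc with
  | nil => intro j hj hlt; simp [pvCnt] at hlt
  | cons t tl ih =>
    intro j hj hlt
    simp only [pvCnt] at hlt
    split at hlt
    · omega
    · rename_i hle
      cases j with
      | zero =>
        simp only [pvCostsB, List.getElem_cons_zero]
        omega
      | succ j' =>
        simp only [pvCostsB, List.getElem_cons_succ]
        exact ih (acc + PySem.Str.len t + 2) j'
          (by simpa [pvCostsB] using hj) (by omega)

theorem pvCnt_high (max_chars : Int) (terms : List String) (acc : Int) :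
    ∀ j (hj : j < (pvCostsB terms acc).length), pvCnt max_chars terms acc ≤ j →
      max_chars < (pvCostsB terms acc)[j] := by
  induction terms generalizing acc with
  | nil => intro j hj _; simp [pvCostsB] at hj
  | cons t tl ih =>
    intro j hj hge
    simp only [pvCnt] at hge
    split at hge
    · rename_i hgt
      cases j with
      | zero =>
        simp only [pvCostsB, List.getElem_cons_zero]
        omega
      | succ j' =>
        simp only [pvCostsB, List.getElem_cons_succ]
        have hj' : j' < (pvCostsB tl (acc + PySem.Str.len t + 2)).length := by
          simpa [pvCostsB] using hj
        have hmem : (pvCostsB tl (acc + PySem.Str.len t + 2))[j'] ∈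
            pvCostsB tl (acc + PySem.Str.len t + 2) := List.getElem_mem hj'
        have := pvCostsB_lb tl (acc + PySem.Str.len t + 2) _ hmem
        omega
    · cases j with
      | zero => omega
      | succ j' =>
        simp only [pvCostsB, List.getElem_cons_succ]
        exact ih (acc + PySem.Str.len t + 2) j'
          (by simpa [pvCostsB] using hj) (by omega)

theorem pvCnt_eq_bisect (max_chars : Int) (terms : List String) :
    pvCnt max_chars terms (-2) = PySem.List.bisectRight (pvCostsB terms (-2)) max_chars := by
  set c := pvCostsB terms (-2) with hc
  obtain ⟨hkle, hklow, hkhigh⟩ :=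
    PySem.List.bisectRight_spec c max_chars (pvCostsB_pairwise terms (-2))
  set k := PySem.List.bisectRight c max_chars
  have hcntle : pvCnt max_chars terms (-2) ≤ c.length := by
    rw [hc, pvCostsB_length]; exact pvCnt_le _ _ _
  rcases Nat.lt_trichotomy (pvCnt max_chars terms (-2)) k with h | h | h
  · exfalso
    have hj : pvCnt max_chars terms (-2) < c.length := by omega
    have h1 := hklow _ hj h
    have h2 := pvCnt_high max_chars terms (-2) _ hj (le_refl _)
    simp only [← hc] at h2
    omega
  · exact h
  · exfalso
    have hj : k < c.length := by omega
    have h1 := pvCnt_low max_chars terms (-2) _ hj h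
    simp only [← hc] at h1
    have h2 := hkhigh _ hj (le_refl _)
    omega

-- ===== VERDICT (by name: the statement is the Claim_ definition above) =====
theorem pack_into_budget_py_spec : Claim_equal_pack_into_budget_py := by
  intro terms max_chars _
  simp only [Spec_pack_into_budget_py, pack_into_budget_py, pack_into_budget_py_alt]
  rw [pvPackA_take, pvCnt_eq_bisect, PySem.List.slice_to terms (by positivity)]
  simp
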